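-- pv_equiv track=rewrite | github.com/sw1203/Coding_study | Programmers/2_42888.py | solution
-- ===== SOURCE A (Python) =====
-- def solution(record_list):
--     user_info = {}
--
--     for record in record_list:
--         if record[0] in ["E", "C"]:
--             sentence = record.split()
--             id = sentence[1]
--             name = sentence[2]
--             user_info[id] = name
--
--     return make_sentences(record_list, user_info)
--
-- def make_sentences(record_list, user_info):
--     result = []
--     printer = {
--         "E": "님이 들어왔습니다.",
--         "L": "님이 나갔습니다."
--     }
--     for record in record_list:
--         if record[0] in ["E", "L"] :
--             sentence = record.split()
--             id = sentence[1]
--             result.append(f"{user_info[id] + printer[record[0]]}")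
--
--     return result
-- ===== SOURCE B (Python) =====
-- def solution(record_list):
--     user_info = {}
--     events = []
--     for record in record_list:
--         parts = record.split()
--         action = record[0]
--         if action in "EC":
--             user_info[parts[1]] = parts[2]
--         if action in "EL":
--             events.append((action, parts[1]))
--     printer = {"E": "님이 들어왔습니다.", "L": "님이 나갔습니다."}
--     return [user_info[uid] + printer[action] for action, uid in events]
-- ===== Notes on version B (the rewrite author's own statement) =====
-- stated objective: alternative
-- what changed: A scans record_list twice, re-splitting each record in both scans; B makes one scan that simultaneously builds the name table and an (action,id) event list, then formats by mapping over the events list instead of re-scanning and re-splitting the records.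
import Mathlib
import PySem

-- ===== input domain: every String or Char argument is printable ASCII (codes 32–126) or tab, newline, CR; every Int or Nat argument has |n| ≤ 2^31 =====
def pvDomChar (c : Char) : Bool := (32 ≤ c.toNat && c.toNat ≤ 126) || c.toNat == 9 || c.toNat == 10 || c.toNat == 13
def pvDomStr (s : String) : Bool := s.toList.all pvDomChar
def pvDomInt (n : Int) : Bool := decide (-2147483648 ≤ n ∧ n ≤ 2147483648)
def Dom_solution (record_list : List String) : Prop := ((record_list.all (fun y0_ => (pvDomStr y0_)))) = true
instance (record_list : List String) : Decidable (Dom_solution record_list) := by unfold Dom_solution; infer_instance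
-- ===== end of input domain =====

-- B does the same job with one scan collecting a name table plus an (action,id) event
-- list, then formats the events; A rescans and resplits the records a second time.
-- Equivalence is about return values; where Python A raises (Pre_ excludes it) the ports use defaults.

-- ===== PORT A =====
-- helper make_sentences of A (kept as a helper; user_info[id]/printer[...] lookups are
-- total via getD — Pre_solution excludes the inputs where the Python raises)
def makeSentences (record_list : List String) (user_info : PySem.Dict String String) : List String :=
  record_list.foldl (fun result record =>
    if PySem.Str.pyGet? record 0 = some 'E' ∨ PySem.Str.pyGet? record 0 = some 'L' then
      let sentence := PySem.Str.split₀ record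
      let id := PySem.List.pyGetD sentence 1 ""
      result ++ [PySem.Dict.getD user_info id "" ++
        (if PySem.Str.pyGet? record 0 = some 'E' then "님이 들어왔습니다." else "님이 나갔습니다.")]
    else result) []

def solution (record_list : List String) : List String :=
  let user_info := record_list.foldl (fun d record =>
    if PySem.Str.pyGet? record 0 = some 'E' ∨ PySem.Str.pyGet? record 0 = some 'C' then
      let sentence := PySem.Str.split₀ record
      PySem.Dict.insert d (PySem.List.pyGetD sentence 1 "") (PySem.List.pyGetD sentence 2 "")
    else d) PySem.Dict.empty
  makeSentences record_list user_info

-- ===== PORT B =====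
def solution_alt (record_list : List String) : List String :=
  let st := record_list.foldl
    (fun (p : PySem.Dict String String × List (Char × String)) record =>
      let parts := PySem.Str.split₀ record
      let action := PySem.Str.pyGet? record 0
      let d := if action = some 'E' ∨ action = some 'C' then
          p.1.insert (PySem.List.pyGetD parts 1 "") (PySem.List.pyGetD parts 2 "")
        else p.1
      let es := if action = some 'E' ∨ action = some 'L' then
          p.2 ++ [(action.getD ' ', PySem.List.pyGetD parts 1 "")]
        else p.2
      (d, es))
    (PySem.Dict.empty, [])
  st.2.map (fun e => PySem.Dict.getD st.1 e.2 "" ++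
    (if e.1 = 'E' then "님이 들어왔습니다." else "님이 나갔습니다."))

-- ===== PRECONDITION & SPEC =====
-- Pre_ excludes exactly the inputs where Python A raises: an empty record (IndexError on
-- record[0]), an E/C record with fewer than 3 whitespace tokens (IndexError), and an L
-- record with fewer than 2 tokens or whose id never occurs as the id of an E/C record (KeyError).
def Pre_solution (record_list : List String) : Prop :=
  ∀ r ∈ record_list,
    r ≠ "" ∧
    ((PySem.Str.pyGet? r 0 = some 'E' ∨ PySem.Str.pyGet? r 0 = some 'C') →
       3 ≤ (PySem.Str.split₀ r).length) ∧
    (PySem.Str.pyGet? r 0 = some 'L' →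
       2 ≤ (PySem.Str.split₀ r).length ∧
       ∃ r' ∈ record_list,
         (PySem.Str.pyGet? r' 0 = some 'E' ∨ PySem.Str.pyGet? r' 0 = some 'C') ∧
         (PySem.Str.split₀ r')[1]? = (PySem.Str.split₀ r)[1]?)
instance (record_list : List String) : Decidable (Pre_solution record_list) := by
  unfold Pre_solution; infer_instance

def pvWitness_solution : List String := ["E a b", "L a"]

def Spec_solution (record_list : List String) (out : List String) : Prop := out = solution_alt record_list
instance (record_list : List String) (out : List String) : Decidable (Spec_solution record_list out) := by unfold Spec_solution; infer_instance

-- ===== CLAIM (what is proved, stated in full; the proofs are below) =====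
def Claim_equal_solution : Prop := ∀ (record_list : List String), Dom_solution record_list → Pre_solution record_list → Spec_solution record_list (solution record_list)

-- ===== LEMMAS AND PROOFS =====

-- the event a single record contributes in B's scan
def evOf (record : String) : List (Char × String) :=
  if PySem.Str.pyGet? record 0 = some 'E' ∨ PySem.Str.pyGet? record 0 = some 'L' then
    [((PySem.Str.pyGet? record 0).getD ' ', PySem.List.pyGetD (PySem.Str.split₀ record) 1 "")]
  else []

-- B's fold: first component is exactly A's user_info fold, second is the flat event list
lemma alt_fold_eq (rs : List String) (d : PySem.Dict String String) (es : List (Char × String)) :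
    rs.foldl
      (fun (p : PySem.Dict String String × List (Char × String)) record =>
        let parts := PySem.Str.split₀ record
        let action := PySem.Str.pyGet? record 0
        let d := if action = some 'E' ∨ action = some 'C' then
            p.1.insert (PySem.List.pyGetD parts 1 "") (PySem.List.pyGetD parts 2 "")
          else p.1
        let es := if action = some 'E' ∨ action = some 'L' then
            p.2 ++ [(action.getD ' ', PySem.List.pyGetD parts 1 "")]
          else p.2
        (d, es)) (d, es)
    = (rs.foldl (fun d record =>
        if PySem.Str.pyGet? record 0 = some 'E' ∨ PySem.Str.pyGet? record 0 = some 'C' then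
          let sentence := PySem.Str.split₀ record
          PySem.Dict.insert d (PySem.List.pyGetD sentence 1 "") (PySem.List.pyGetD sentence 2 "")
        else d) d,
       es ++ rs.flatMap evOf) := by
  induction rs generalizing d es with
  | nil => simp
  | cons r rs ih =>
    simp only [List.foldl_cons, List.flatMap_cons, ih, evOf]
    refine Prod.ext rfl ?_
    split_ifs <;> simp

-- A's make_sentences formats exactly the event list
lemma makeSentences_eq (rs : List String) (u : PySem.Dict String String)
    (acc : List String) :
    rs.foldl (fun result record =>
      if PySem.Str.pyGet? record 0 = some 'E' ∨ PySem.Str.pyGet? record 0 = some 'L' then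
        let sentence := PySem.Str.split₀ record
        let id := PySem.List.pyGetD sentence 1 ""
        result ++ [PySem.Dict.getD u id "" ++
          (if PySem.Str.pyGet? record 0 = some 'E' then "님이 들어왔습니다." else "님이 나갔습니다.")]
      else result) acc
    = acc ++ (rs.flatMap evOf).map (fun e => PySem.Dict.getD u e.2 "" ++
        (if e.1 = 'E' then "님이 들어왔습니다." else "님이 나갔습니다.")) := by
  induction rs generalizing acc with
  | nil => simp
  | cons r rs ih =>
    simp only [List.foldl_cons, List.flatMap_cons, List.map_append, ih, evOf]
    by_cases h : PySem.List.pyGet? r.toList 0 = some 'E' ∨ PySem.List.pyGet? r.toList 0 = some 'L'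
    · rcases h with h | h <;>
        simp [PySem.Str.pyGet?, h, List.append_assoc, (by decide : ('L' : Char) ≠ 'E')]
    · simp [PySem.Str.pyGet?, h]

-- ===== VERDICT (by name: the statement is the Claim_ definition above) =====
theorem solution_spec : Claim_equal_solution := by
  intro rs _ _
  unfold Spec_solution solution solution_alt makeSentences
  rw [alt_fold_eq, makeSentences_eq]
  simp
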